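/- GENERATED by c/gen_decode.py: decode facts of the image, one per distinct instruction byte string. -/
import UserX.DecodeImage

#decode_all Vorbis.Dec
  "0f5715f3620100"  -- xorps xmm2,XMMWORD PTR [rip+0x162f3]
  "0f84a8010000"  -- je 1133d2
  "0f858e000000"  -- jne 10e880
  "0f8e01010000"  -- jle 114db9
  "0fb62b"  -- movzx ebp,BYTE PTR [rbx]
  "25f0f0f0f0"  -- and eax,0xf0f0f0f0
  "3cf3"  -- cmp al,0xf3
  "410fb71c5c"  -- movzx ebx,WORD PTR [r12+rbx*2]
  "4183c001"  -- add r8d,0x1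
  "4189c7"  -- mov r15d,eax
  "418d5e01"  -- lea ebx,[r14+0x1]
  "41f77608"  -- div DWORD PTR [r14+0x8]
  "4421ed"  -- and ebp,r13d
  "44886d00"  -- mov BYTE PTR [rbp+0x0],r13b
  "4489ad90000000"  -- mov DWORD PTR [rbp+0x90],r13d
  "448b6be4"  -- mov r13d,DWORD PTR [rbx-0x1c]
  "448d68ff"  -- lea r13d,[rax-0x1]
  "45893424"  -- mov DWORD PTR [r12],r14d
  "458d24c4"  -- lea r12d,[r12+rax*8]
  "4829c3"  -- sub rbx,rax
  "4863f5"  -- movsxd rsi,ebp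
  "4883ea10"  -- sub rdx,0x10
  "4889742408"  -- mov QWORD PTR [rsp+0x8],rsi
  "488b442418"  -- mov rax,QWORD PTR [rsp+0x18]
  "488b9530ffffff"  -- mov rdx,QWORD PTR [rbp-0xd0]
  "488d542460"  -- lea rdx,[rsp+0x60]
  "488d7d04"  -- lea rdi,[rbp+0x4]
  "488dbb40061200"  -- lea rdi,[rbx+0x120640]
  "488dbd84000000"  -- lea rdi,[rbp+0x84]
  "48c744241040381100"  -- mov QWORD PTR [rsp+0x10],0x113840
  "49039c2438080000"  -- add rbx,QWORD PTR [r12+0x838]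
  "49892c24"  -- mov QWORD PTR [r12],rbp
  "498d7c1d11"  -- lea rdi,[r13+rbx*1+0x11]
  "498dbc24e8060000"  -- lea rdi,[r12+0x6e8]
  "4a8b74eb08"  -- mov rsi,QWORD PTR [rbx+r13*8+0x8]
  "4c036310"  -- add r12,QWORD PTR [rbx+0x10]
  "4c896c2460"  -- mov QWORD PTR [rsp+0x60],r13
  "4c8b6c2440"  -- mov r13,QWORD PTR [rsp+0x40]
  "4c8d6406f8"  -- lea r12,[rsi+rax*1-0x8]
  "4d85ff"  -- test r15,r15
  "4e8d34a8"  -- lea r14,[rax+r13*4]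
  "660fefc9"  -- pxor xmm1,xmm1
  "6644892c6b"  -- mov WORD PTR [rbx+rbp*2],r13w
  "7356"  -- jae 111c3b
  "7476"  -- je 107905
  "75d1"  -- jne 114155
  "7d19"  -- jge 10823c
  "7f21"  -- jg 1041e7
  "81fef8ffff7f"  -- cmp esi,0x7ffffff8
  "83f801"  -- cmp eax,0x1
  "894da8"  -- mov DWORD PTR [rbp-0x58],ecx
  "89c2"  -- mov edx,eax
  "8b450c"  -- mov eax,DWORD PTR [rbp+0xc]
  "8b83e8060000"  -- mov eax,DWORD PTR [rbx+0x6e8]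
  "8d70ff"  -- lea esi,[rax-0x1]
  "bf00000000"  -- mov edi,0x0
  "c744241800000000"  -- mov DWORD PTR [rsp+0x18],0x0
  "c784249000000000000000"  -- mov DWORD PTR [rsp+0x90],0x0
  "e806f9ffff"  -- call 10d5c0
  "e81030ffff"  -- call 100800
  "e819fefeff"  -- call 103d00
  "e823cefeff"  -- call 101440
  "e82cb3feff"  -- call 100480
  "e836cffeff"  -- call 100640
  "e841f7feff"  -- call 100480
  "e84c0dffff"  -- call 103d00
  "e856c2feff"  -- call 100640
  "e8648cffff"  -- call 10d1c0
  "e86ff1feff"  -- call 103d00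
  "e87a91ffff"  -- call 10cbc0
  "e886acffff"  -- call 100640
  "e89079ffff"  -- call 103d00
  "e89a6affff"  -- call 100640
  "e8a59affff"  -- call 100640
  "e8af95ffff"  -- call 104800
  "e8b89cffff"  -- call 100640
  "e8c345ffff"  -- call 1008e0
  "e8cc66ffff"  -- call 101820
  "e8d761ffff"  -- call 10c1a0
  "e8e13cffff"  -- call 108f20
  "e8ea77ffff"  -- call 100640
  "e8f1d7feff"  -- call 103d00
  "e8fdbffeff"  -- call 1003c0
  "e936ffffff"  -- jmp 10f409
  "e980fbffff"  -- jmp 115982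
  "e9d5000000"  -- jmp 107194
  "eb41"  -- jmp 104a56
  "ebc7"  -- jmp 115809
  "f20f11542428"  -- movsd QWORD PTR [rsp+0x28],xmm2
  "f20f59dc"  -- mulsd xmm3,xmm4
  "f30f1044240c"  -- movss xmm0,DWORD PTR [rsp+0xc]
  "f30f106bd0"  -- movss xmm5,DWORD PTR [rbx-0x30]
  "f30f1145e4"  -- movss DWORD PTR [rbp-0x1c],xmm0
  "f30f116be4"  -- movss DWORD PTR [rbx-0x1c],xmm5
  "f30f584bec"  -- addss xmm1,DWORD PTR [rbx-0x14]
  "f30f597b10"  -- mulss xmm7,DWORD PTR [rbx+0x10]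
  "f30f5ce9"  -- subss xmm5,xmm1
  "f3410f114e0c"  -- movss DWORD PTR [r14+0xc],xmm1
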